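-- pv_equiv track=rewrite | github.com/yht0827/coding-test | zuzubibi/2월/2월 15일/⭐⭐⭐⭐⭐후보키.py | anotherSolution
-- ===== SOURCE A (Python) =====
-- from itertools import combinations
--
-- def anotherSolution(relation):
--     row = len(relation)
--     col = len(relation[0])
--
--     # 가능한 속성의 모든 인덱스 조합
--     combi = []
--     for i in range(1, col+1):
--         combi.extend(combinations(range(col), i))
--
--     # 유일성
--     unique = []
--     for i in combi:
--         tmp = [tuple([item[key] for key in i]) for item in relation]
--
--         if len(set(tmp)) == row: # 유일성
--             put = True
--
--             for x in unique:
--                 if set(x).issubset(set(i)): # 최소성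
--                     put = False
--                     break
--             if put: unique.append(i)
--     return len(unique)
-- ===== SOURCE B (Python) =====
-- from itertools import combinations
--
-- def anotherSolution(relation):
--     row = len(relation)
--     col = len(relation[0])
--
--     # pass 1: every non-empty index subset whose projection is duplicate-free
--     superkeys = set()
--     for size in range(1, col + 1):
--         for comb in combinations(range(col), size):
--             if len({tuple(r[k] for k in comb) for r in relation}) == row:
--                 superkeys.add(comb)
--
--     # pass 2: keep only the minimal ones
--     count = 0
--     for key in superkeys:
--         if all(sub not in superkeys
--                for s in range(1, len(key))
--                for sub in combinations(key, s)):
--             count += 1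
--     return count
-- ===== Notes on version B (the rewrite author's own statement) =====
-- stated objective: alternative
-- what changed: Replaces A's single greedy pass (append a unique subset only if no previously kept key is contained in it) with two independent passes: first collect the full set of superkeys, then count those none of whose proper non-empty subsets is itself a superkey.
import Mathlib
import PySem

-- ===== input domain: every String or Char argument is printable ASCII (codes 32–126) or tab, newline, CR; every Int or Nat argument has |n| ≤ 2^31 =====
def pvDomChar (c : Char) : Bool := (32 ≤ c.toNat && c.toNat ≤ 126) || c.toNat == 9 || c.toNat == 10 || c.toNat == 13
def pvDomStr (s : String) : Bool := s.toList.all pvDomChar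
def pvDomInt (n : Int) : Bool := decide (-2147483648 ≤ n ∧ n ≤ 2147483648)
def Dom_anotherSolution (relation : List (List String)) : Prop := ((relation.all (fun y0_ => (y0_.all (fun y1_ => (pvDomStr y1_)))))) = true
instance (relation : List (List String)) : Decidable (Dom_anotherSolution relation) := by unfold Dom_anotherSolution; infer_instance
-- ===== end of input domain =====

-- B replaces A's single greedy pass (keep a subset unless an already-kept key is contained in it)
-- by two passes: first collect ALL superkeys, then count those with no proper non-empty subset
-- that is itself a superkey ("alternative" decomposition, no speed claim).

-- itertools.combinations(l, k) in its enumeration order (used by both Pythons)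
def pvCombos : Nat → List Nat → List (List Nat)
  | 0, _ => [[]]
  | _ + 1, [] => []
  | k + 1, x :: xs => (pvCombos k xs).map (fun c => x :: c) ++ pvCombos (k + 1) xs

-- [tuple(item[key] for key in i) for item in relation]  (shared comprehension of both Pythons)
def pvProj (relation : List (List String)) (i : List Nat) : List (List (Option String)) :=
  relation.map (fun item => i.map (fun k => PySem.List.pyGet? item (Int.ofNat k)))

-- ===== PORT A =====
def anotherSolution (relation : List (List String)) : Int :=
  let row := relation.length
  let col := match PySem.List.pyGet? relation 0 with
             | some r => r.length
             | none => 0      -- Python raises IndexError here; excluded by Pre_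
  -- for i in range(1, col+1): combi.extend(combinations(range(col), i))
  let combi := (List.range col).foldl
      (fun acc j => acc ++ pvCombos (j + 1) (List.range col)) []
  let unique := combi.foldl (fun unique i =>
      if (PySem.Set.ofList (pvProj relation i)).length == row then
        if unique.any (fun x =>
            PySem.Set.issubset (PySem.Set.ofList x) (PySem.Set.ofList i)) then unique
        else unique ++ [i]
      else unique) []
  Int.ofNat unique.length

-- ===== PORT B =====
def anotherSolution_alt (relation : List (List String)) : Int :=
  let row := relation.length
  let col := match PySem.List.pyGet? relation 0 with
             | some r => r.length
             | none => 0      -- Python raises IndexError here; excluded by Pre_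
  -- pass 1: superkeys = { comb | projection on comb is duplicate-free }
  let superkeys := ((List.range col).flatMap (fun j => pvCombos (j + 1) (List.range col))).foldl
      (fun sk comb =>
        if (PySem.Set.ofList (pvProj relation comb)).length == row then PySem.Set.add sk comb
        else sk) PySem.Set.empty
  -- pass 2: count the keys none of whose proper non-empty subsets is a superkey
  superkeys.foldl (fun count key =>
      if (List.range (key.length - 1)).all (fun s =>
           (pvCombos (s + 1) key).all (fun sub => !(PySem.Set.contains superkeys sub)))
      then count + 1 else count) (0 : Int)

-- ===== PRECONDITION & SPEC =====
-- Pre_ excludes exactly the inputs where the Python A raises IndexError: the empty relation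
-- (relation[0]) and relations with a row shorter than the first row (item[key] out of range).
def Pre_anotherSolution (relation : List (List String)) : Prop :=
  relation ≠ [] ∧ ∀ r ∈ relation, (relation.headD []).length ≤ r.length
instance (relation : List (List String)) : Decidable (Pre_anotherSolution relation) := by
  unfold Pre_anotherSolution; infer_instance
def pvWitness_anotherSolution : List (List String) := [["a", "b"], ["b", "b"]]
def Spec_anotherSolution (relation : List (List String)) (out : Int) : Prop :=
  out = anotherSolution_alt relation
instance (relation : List (List String)) (out : Int) : Decidable (Spec_anotherSolution relation out) := by
  unfold Spec_anotherSolution; infer_instance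

-- ===== CLAIM (what is proved, stated in full; the proofs are below) =====
def Claim_equal_anotherSolution : Prop := ∀ (relation : List (List String)),
  Dom_anotherSolution relation → Pre_anotherSolution relation →
  Spec_anotherSolution relation (anotherSolution relation)

-- ===== LEMMAS AND PROOFS =====

-- "is a superkey": the projected rows are pairwise distinct (the test both ports run)
def pvSk (relation : List (List String)) (i : List Nat) : Bool :=
  (PySem.Set.ofList (pvProj relation i)).length == relation.length

-- "minimal": no proper non-empty subsequence is a superkey
def pvMin (relation : List (List String)) (i : List Nat) : Prop :=
  ∀ sub : List Nat, sub.Sublist i → sub ≠ [] → sub.length < i.length → pvSk relation sub = false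

-- Boolean version of pvMin (kept a plain def: named instances other than Spec_/Pre_ are not allowed)
def pvMinB (relation : List (List String)) (i : List Nat) : Bool :=
  decide (∀ sub ∈ i.sublists, sub ≠ [] → sub.length < i.length → pvSk relation sub = false)

theorem pvMinB_iff (relation : List (List String)) (i : List Nat) :
    pvMinB relation i = true ↔ pvMin relation i := by
  unfold pvMinB pvMin
  rw [decide_eq_true_eq]
  constructor
  · intro h sub hsl; exact h sub (List.mem_sublists.mpr hsl)
  · intro h sub hsl; exact h sub (List.mem_sublists.mp hsl)

def pvL (c : Nat) : List (List Nat) :=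
  (List.range c).flatMap (fun j => pvCombos (j + 1) (List.range c))

theorem mem_pvCombos {k : Nat} {l y : List Nat} :
    y ∈ pvCombos k l ↔ y.Sublist l ∧ y.length = k := by
  induction l generalizing k y with
  | nil =>
    cases k with
    | zero => simp [pvCombos, List.sublist_nil]
    | succ k =>
      constructor
      · intro h; simp [pvCombos] at h
      · rintro ⟨h, hl⟩; rw [List.sublist_nil] at h; subst h; simp at hl
  | cons x xs ih =>
    cases k with
    | zero =>
      simp only [pvCombos, List.mem_singleton]
      constructor
      · rintro rfl; exact ⟨List.nil_sublist _, rfl⟩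
      · rintro ⟨-, h⟩; exact List.eq_nil_of_length_eq_zero h
    | succ k =>
      simp only [pvCombos, List.mem_append, List.mem_map, ih]
      constructor
      · rintro (⟨z, ⟨hz, hlen⟩, rfl⟩ | ⟨h, hlen⟩)
        · exact ⟨List.cons_sublist_cons.mpr hz, by simp [hlen]⟩
        · exact ⟨h.cons _, hlen⟩
      · rintro ⟨hsub, hlen⟩
        rcases List.sublist_cons_iff.mp hsub with h | ⟨r, rfl, hr⟩
        · exact Or.inr ⟨h, hlen⟩
        · exact Or.inl ⟨r, ⟨hr, by simpa using hlen⟩, rfl⟩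

theorem nodup_pvCombos {k : Nat} {l : List Nat} (h : l.Nodup) : (pvCombos k l).Nodup := by
  induction l generalizing k with
  | nil => cases k <;> simp [pvCombos]
  | cons x xs ih =>
    cases k with
    | zero => simp [pvCombos]
    | succ k =>
      have hx : x ∉ xs := by simp_all
      have hxs : xs.Nodup := by simp_all
      simp only [pvCombos, List.nodup_append]
      refine ⟨(ih hxs).map (fun a b hab => by injection hab), ih hxs, ?_⟩
      rintro a ha b hb rfl
      rcases List.mem_map.mp ha with ⟨z, -, rfl⟩
      exact hx ((mem_pvCombos.mp hb).1.subset (by simp))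

theorem mem_pvL {c : Nat} {y : List Nat} :
    y ∈ pvL c ↔ y.Sublist (List.range c) ∧ y ≠ [] := by
  simp only [pvL, List.mem_flatMap, List.mem_range, mem_pvCombos]
  constructor
  · rintro ⟨j, hj, hsub, hlen⟩
    exact ⟨hsub, by intro h; subst h; simp at hlen⟩
  · rintro ⟨hsub, hne⟩
    have h1 : 1 ≤ y.length := by
      cases y with | nil => simp at hne | cons a t => simp
    have h2 : y.length ≤ c := by simpa using hsub.length_le
    exact ⟨y.length - 1, by omega, hsub, by omega⟩

theorem flatMap_pvCombos_facts (c : Nat) (js : List Nat) (hjs : js.Pairwise (· < ·)) :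
    (js.flatMap (fun j => pvCombos (j + 1) (List.range c))).Nodup ∧
    (js.flatMap (fun j => pvCombos (j + 1) (List.range c))).Pairwise
      (fun a b => a.length ≤ b.length) := by
  induction js with
  | nil => simp
  | cons j js ih =>
    obtain ⟨hlt, hjs'⟩ := List.pairwise_cons.mp hjs
    obtain ⟨ihn, ihp⟩ := ih hjs'
    have hblock : ∀ y ∈ pvCombos (j + 1) (List.range c), y.length = j + 1 :=
      fun y hy => (mem_pvCombos.mp hy).2
    have hrest : ∀ y ∈ js.flatMap (fun j' => pvCombos (j' + 1) (List.range c)),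
        ∃ j' ∈ js, y.length = j' + 1 := by
      intro y hy
      obtain ⟨j', hj', hyj⟩ := List.mem_flatMap.mp hy
      exact ⟨j', hj', (mem_pvCombos.mp hyj).2⟩
    constructor
    · rw [List.flatMap_cons, List.nodup_append]
      refine ⟨nodup_pvCombos List.nodup_range, ihn, ?_⟩
      intro a ha b hb hab
      obtain ⟨j', hj', hb'⟩ := hrest b hb
      have := hblock a ha
      have := hlt j' hj'
      subst hab; omega
    · rw [List.flatMap_cons, List.pairwise_append]
      refine ⟨?_, ihp, ?_⟩
      · exact List.pairwise_of_forall_mem_list (fun a ha b hb => by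
          rw [hblock a ha, hblock b hb])
      · intro a ha b hb
        obtain ⟨j', hj', hb'⟩ := hrest b hb
        have := hblock a ha
        have := hlt j' hj'
        omega

theorem nodup_pvL {c : Nat} : (pvL c).Nodup :=
  (flatMap_pvCombos_facts c (List.range c) List.pairwise_lt_range).1

theorem pairwise_pvL {c : Nat} : (pvL c).Pairwise (fun a b => a.length ≤ b.length) :=
  (flatMap_pvCombos_facts c (List.range c) List.pairwise_lt_range).2

theorem subset_sublist {x i l : List Nat} (hx : x.Sublist l) (hi : i.Sublist l)
    (hl : l.Nodup) (hsub : x ⊆ i) : x.Sublist i := by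
  induction l generalizing x i with
  | nil => rw [List.sublist_nil] at hx; subst hx; exact List.nil_sublist _
  | cons a l ih =>
    have ha : a ∉ l := (List.nodup_cons.mp hl).1
    have hl' : l.Nodup := (List.nodup_cons.mp hl).2
    rcases List.sublist_cons_iff.mp hx with hxl | ⟨x', rfl, hx'⟩
    · rcases List.sublist_cons_iff.mp hi with hil | ⟨i', rfl, hi'⟩
      · exact ih hxl hil hl' hsub
      · have hax : a ∉ x := fun h => ha (hxl.subset h)
        have hsub' : x ⊆ i' := by
          intro k hk
          rcases List.mem_cons.mp (hsub hk) with h | h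
          · exact absurd (h ▸ hk) hax
          · exact h
        exact (ih hxl hi' hl' hsub').cons a
    · rcases List.sublist_cons_iff.mp hi with hil | ⟨i', rfl, hi'⟩
      · exact absurd (hil.subset (hsub (List.mem_cons_self))) ha
      · have hax' : a ∉ x' := fun h => ha (hx'.subset h)
        have hsub' : x' ⊆ i' := by
          intro k hk
          rcases List.mem_cons.mp (hsub (List.mem_cons_of_mem a hk)) with h | h
          · exact absurd (h ▸ hk) hax'
          · exact h
        exact List.cons_sublist_cons.mpr (ih hx' hi' hl' hsub')

theorem pv_descent (relation : List (List String)) (y : List Nat) (hne : y ≠ [])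
    (hsk : pvSk relation y = true) :
    ∃ z : List Nat, z.Sublist y ∧ z ≠ [] ∧ pvSk relation z = true ∧ pvMin relation z := by
  by_cases h : pvMin relation y
  · exact ⟨y, List.Sublist.refl _, hne, hsk, h⟩
  · unfold pvMin at h
    push_neg at h
    obtain ⟨sub, hsub, hne', hlt, hsk'⟩ := h
    have hsk'' : pvSk relation sub = true := by
      cases hb : pvSk relation sub with
      | false => exact absurd hb hsk'
      | true => rfl
    obtain ⟨z, hz1, hz2, hz3, hz4⟩ := pv_descent relation sub hne' hsk''
    exact ⟨z, hz1.trans hsub, hz2, hz3, hz4⟩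
termination_by y.length
decreasing_by exact hlt

-- A's greedy loop over the size-ordered enumeration keeps exactly the minimal superkeys
theorem A_fold_invariant (relation : List (List String)) (c : Nat) :
    ∀ (L₂ L₁ : List (List Nat)), pvL c = L₁ ++ L₂ →
    L₂.foldl (fun unique i =>
      if (PySem.Set.ofList (pvProj relation i)).length == relation.length then
        if unique.any (fun x =>
            PySem.Set.issubset (PySem.Set.ofList x) (PySem.Set.ofList i)) then unique
        else unique ++ [i]
      else unique)
      (L₁.filter (fun i => pvSk relation i && pvMinB relation i))
    = (L₁ ++ L₂).filter (fun i => pvSk relation i && pvMinB relation i) := by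
  intro L₂
  induction L₂ with
  | nil => intro L₁ h; simp
  | cons i L₂' ih =>
    intro L₁ h
    have hiL : i ∈ pvL c := by rw [h]; simp
    have hiR : i.Sublist (List.range c) := (mem_pvL.mp hiL).1
    have hine : i ≠ [] := (mem_pvL.mp hiL).2
    have hnod : (L₁ ++ i :: L₂').Nodup := h ▸ nodup_pvL
    have hiL₁ : i ∉ L₁ := by
      intro hmem
      exact (List.nodup_append.mp hnod).2.2 i hmem i List.mem_cons_self rfl
    have hstep : (if (PySem.Set.ofList (pvProj relation i)).length == relation.length then
        if (L₁.filter (fun i => pvSk relation i && pvMinB relation i)).any (fun x =>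
            PySem.Set.issubset (PySem.Set.ofList x) (PySem.Set.ofList i)) then
          L₁.filter (fun i => pvSk relation i && pvMinB relation i)
        else L₁.filter (fun i => pvSk relation i && pvMinB relation i) ++ [i]
      else L₁.filter (fun i => pvSk relation i && pvMinB relation i))
      = (L₁ ++ [i]).filter (fun i => pvSk relation i && pvMinB relation i) := by
      have hsubch : ∀ x : List Nat,
          PySem.Set.issubset (PySem.Set.ofList x) (PySem.Set.ofList i) = true ↔ x ⊆ i := by
        intro x
        simp only [PySem.Set.issubset, List.all_eq_true, PySem.Set.contains_iff,
          PySem.Set.mem_ofList _ _]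
        constructor
        · intro hall k hk; exact hall k hk
        · intro hs k hk; exact hs hk
      rw [List.filter_append]
      cases hski : pvSk relation i with
      | false =>
        have : ((PySem.Set.ofList (pvProj relation i)).length == relation.length) = false := hski
        rw [this]
        simp [hski]
      | true =>
        have : ((PySem.Set.ofList (pvProj relation i)).length == relation.length) = true := hski
        rw [this]
        by_cases hmin : pvMin relation i
        · -- i is a minimal superkey: no kept key is a subset of it
          have hany : (L₁.filter (fun i => pvSk relation i && pvMinB relation i)).any
              (fun x => PySem.Set.issubset (PySem.Set.ofList x) (PySem.Set.ofList i)) = false := by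
            rw [List.any_eq_false]
            intro x hx
            obtain ⟨hxL₁, hgood⟩ := List.mem_filter.mp hx
            rw [Bool.and_eq_true] at hgood
            intro hiss
            have hxsub : x ⊆ i := (hsubch x).mp hiss
            have hxL : x ∈ pvL c := by rw [h]; simp [hxL₁]
            have hxsl : x.Sublist i :=
              subset_sublist (mem_pvL.mp hxL).1 hiR List.nodup_range hxsub
            have hxne : x ≠ i := fun hxi => hiL₁ (hxi ▸ hxL₁)
            have hxlt : x.length < i.length := by
              have hle := hxsl.length_le
              rcases Nat.lt_or_ge x.length i.length with hlt | hge
              · exact hlt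
              · exact absurd (hxsl.eq_of_length (by omega)) hxne
            have := hmin x hxsl (mem_pvL.mp hxL).2 hxlt
            rw [hgood.1] at this
            exact Bool.noConfusion this
          rw [hany]
          simp [hski, (pvMinB_iff relation i).mpr hmin]
        · -- i is a non-minimal superkey: some kept minimal superkey is inside it
          have hany : (L₁.filter (fun i => pvSk relation i && pvMinB relation i)).any
              (fun x => PySem.Set.issubset (PySem.Set.ofList x) (PySem.Set.ofList i)) = true := by
            unfold pvMin at hmin
            push_neg at hmin
            obtain ⟨sub, hsubi, hsne, hslt, hssk⟩ := hmin
            have hssk' : pvSk relation sub = true := by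
              cases hb : pvSk relation sub with
              | false => exact absurd hb hssk
              | true => rfl
            obtain ⟨z, hz1, hz2, hz3, hz4⟩ := pv_descent relation sub hsne hssk'
            have hzi : z.Sublist i := hz1.trans hsubi
            have hzlt : z.length < i.length := Nat.lt_of_le_of_lt hz1.length_le hslt
            have hzL : z ∈ pvL c := mem_pvL.mpr ⟨hzi.trans hiR, hz2⟩
            have hzL₁ : z ∈ L₁ := by
              rw [h] at hzL
              rcases List.mem_append.mp hzL with h1 | h1
              · exact h1
              · exfalso
                rcases List.mem_cons.mp h1 with rfl | h2
                · omega
                · have hp := h ▸ pairwise_pvL (c := c)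
                  rw [List.pairwise_append] at hp
                  have := (List.pairwise_cons.mp hp.2.1).1 z h2
                  omega
            rw [List.any_eq_true]
            refine ⟨z, List.mem_filter.mpr ⟨hzL₁, ?_⟩, (hsubch z).mpr hzi.subset⟩
            rw [Bool.and_eq_true]
            exact ⟨hz3, (pvMinB_iff relation z).mpr hz4⟩
          rw [hany]
          have : pvMinB relation i = false := Bool.eq_false_iff.mpr (fun hb => hmin ((pvMinB_iff relation i).mp hb))
          simp [hski, this]
    rw [List.foldl_cons, hstep, ih (L₁ ++ [i]) (by simpa using h)]
    simp

-- B's first pass builds the filtered enumeration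
theorem B_superkeys_eq (relation : List (List String)) (L acc : List (List Nat))
    (hnd : L.Nodup) (hdisj : ∀ x ∈ L, x ∉ acc) :
    L.foldl (fun sk comb =>
      if (PySem.Set.ofList (pvProj relation comb)).length == relation.length then
        PySem.Set.add sk comb
      else sk) acc
    = acc ++ L.filter (fun comb => pvSk relation comb) := by
  induction L generalizing acc with
  | nil => simp
  | cons x L ih =>
    have hx : x ∉ L := (List.nodup_cons.mp hnd).1
    have hnd' : L.Nodup := (List.nodup_cons.mp hnd).2
    rw [List.foldl_cons]
    cases hb : pvSk relation x with
    | false =>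
      have : ((PySem.Set.ofList (pvProj relation x)).length == relation.length) = false := hb
      rw [this]
      simp only [Bool.false_eq_true, if_false]
      rw [ih acc hnd' (fun y hy => hdisj y (List.mem_cons_of_mem x hy))]
      simp [hb]
    | true =>
      have : ((PySem.Set.ofList (pvProj relation x)).length == relation.length) = true := hb
      rw [this]
      simp only [if_true]
      rw [PySem.Set.add_of_not_mem (hdisj x List.mem_cons_self)]
      rw [ih (acc ++ [x]) hnd' ?_]
      · simp [hb]
      · intro y hy
        simp only [List.mem_append, List.mem_singleton]
        rintro (h1 | rfl)
        · exact hdisj y (List.mem_cons_of_mem x hy) h1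
        · exact hx hy

-- B's minimality test agrees with pvMin on members of the enumeration
theorem B_min_eq (relation : List (List String)) (c : Nat) (key : List Nat)
    (hkey : key ∈ pvL c) :
    ((List.range (key.length - 1)).all (fun s =>
      (pvCombos (s + 1) key).all (fun sub =>
        !(PySem.Set.contains ((pvL c).filter (fun comb => pvSk relation comb)) sub))))
    = pvMinB relation key := by
  obtain ⟨hkr, hkne⟩ := mem_pvL.mp hkey
  cases hd : pvMinB relation key with
  | true =>
    rw [pvMinB_iff] at hd
    rw [List.all_eq_true]
    intro s hs
    rw [List.all_eq_true]
    intro sub hsub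
    obtain ⟨hsl, hlen⟩ := mem_pvCombos.mp hsub
    rw [List.mem_range] at hs
    have hne : sub ≠ [] := by intro h; subst h; simp at hlen
    have hlt : sub.length < key.length := by
      have := List.length_pos_iff.mpr hkne
      omega
    have := hd sub hsl hne hlt
    simp only [Bool.not_eq_eq_eq_not, Bool.not_true, ← Bool.not_eq_true]
    intro hcon
    rw [PySem.Set.contains_iff] at hcon
    obtain ⟨-, hskt⟩ := List.mem_filter.mp hcon
    rw [this] at hskt
    exact Bool.noConfusion hskt
  | false =>
    rw [Bool.eq_false_iff, ne_eq, pvMinB_iff] at hd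
    unfold pvMin at hd
    push_neg at hd
    obtain ⟨sub, hsl, hne, hlt, hsk⟩ := hd
    have hsk' : pvSk relation sub = true := by
      cases hb : pvSk relation sub with
      | false => exact absurd hb hsk
      | true => rfl
    rw [← Bool.not_eq_true, List.all_eq_true]
    intro hall
    have h1 : 1 ≤ sub.length := List.length_pos_iff.mpr hne
    have hs : sub.length - 1 ∈ List.range (key.length - 1) := by
      rw [List.mem_range]; omega
    have h2 := List.all_eq_true.mp (hall _ hs) sub
      (mem_pvCombos.mpr ⟨hsl, by omega⟩)
    simp only [Bool.not_eq_eq_eq_not, Bool.not_true, ← Bool.not_eq_true] at h2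
    apply h2
    rw [PySem.Set.contains_iff]
    exact List.mem_filter.mpr ⟨mem_pvL.mpr ⟨hsl.trans hkr, hne⟩, hsk'⟩

-- ===== VERDICT (by name: the statement is the Claim_ definition above) =====
theorem anotherSolution_spec : Claim_equal_anotherSolution := by
  intro relation _ _
  unfold Spec_anotherSolution anotherSolution anotherSolution_alt
  simp only []
  set c := (match PySem.List.pyGet? relation 0 with
            | some r => r.length
            | none => 0) with hc
  rw [PySem.List.foldl_append_eq_flatMap]
  rw [List.nil_append]
  have hA := A_fold_invariant relation c (pvL c) [] (by simp)
  rw [List.filter_nil] at hA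
  rw [show ((List.range c).flatMap fun j => pvCombos (j + 1) (List.range c)) = pvL c from rfl]
  rw [List.nil_append] at hA
  rw [hA]
  have hB := B_superkeys_eq relation (pvL c) PySem.Set.empty nodup_pvL (by
    intro x hx; simp [PySem.Set.empty])
  rw [hB, show (PySem.Set.empty : List (List Nat)) = [] from rfl, List.nil_append]
  rw [PySem.List.foldl_if_add_one
    (fun key => (List.range (key.length - 1)).all (fun s =>
      (pvCombos (s + 1) key).all (fun sub =>
        !(PySem.Set.contains ((pvL c).filter (fun comb => pvSk relation comb)) sub))))]
  rw [List.countP_eq_length_filter]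
  have hcong : ((pvL c).filter (fun comb => pvSk relation comb)).filter
      (fun key => (List.range (key.length - 1)).all (fun s =>
        (pvCombos (s + 1) key).all (fun sub =>
          !(PySem.Set.contains ((pvL c).filter (fun comb => pvSk relation comb)) sub))))
    = (pvL c).filter (fun i => pvSk relation i && pvMinB relation i) := by
    rw [List.filter_filter]
    apply List.filter_congr
    intro key hkey
    rw [B_min_eq relation c key hkey]
    exact Bool.and_comm _ _
  rw [hcong]
  simp [Int.ofNat_eq_natCast]
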